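-- pv_equiv track=rewrite | github.com/nkaslin/meta-puzzles | level_3/slippery_trip/solution.py | getMaxCollectableCoins
-- ===== SOURCE A (Python) =====
-- from typing import List
--
-- def getMaxCollectableCoins(R: int, C: int, G: List[List[str]]) -> int:
--     # Write your code here
--
--     def get_row_stats(row):
--         contains_right = contains_down = contains_coin = False
--         is_passable = False
--         for x in G[row]:
--             if x != '>':
--                 is_passable = True
--             if x == '>':
--                 contains_right = True
--             elif x == 'v':
--                 contains_down = True
--             elif x == '*':
--                 contains_coin = True
--
--         return contains_right, contains_down, contains_coin, is_passable
--
--     def get_max_coins(row):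
--         max_coins = cur_coins = 0
--         takeable = False
--         for x in G[row] * 2:
--             if x == '>':
--                 takeable = True
--             if takeable:
--                 if x == 'v':
--                     max_coins = max(max_coins, cur_coins)
--                     cur_coins = 0
--                     takeable = False
--                 elif x == '*':
--                     cur_coins += 1
--         return max_coins
--
--     res = 0
--     for r in range(R - 1, -1, -1):
--         contains_right, contains_down, contains_coin, is_passable = get_row_stats(r)
--         if not is_passable:
--             res = 0
--         elif contains_right and contains_down:
--             res += get_max_coins(r)
--         elif contains_right:
--             all_coins = sum(int(x == '*') for x in G[r])
--             res = max(all_coins, int(contains_coin) + res)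
--         elif is_passable:
--             res += int(contains_coin)
--
--     return res
-- ===== SOURCE B (Python) =====
-- from typing import List
--
--
-- def _coins_after_arrow(seg):
--     # coins collectable in one 'v'-terminated arc: '*' cells after the first '>'
--     if '>' not in seg:
--         return 0
--     return seg[seg.index('>') + 1:].count('*')
--
--
-- def _best_cycle(row):
--     # rotate the circular row so it ends at its first 'v', then split on 'v'
--     # into complete arcs and take the best arc
--     k = row.index('v')
--     cyc = row[k + 1:] + row[:k + 1]
--     best = 0
--     seg = []
--     for x in cyc:
--         if x == 'v':
--             best = max(best, _coins_after_arrow(seg))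
--             seg = []
--         else:
--             seg.append(x)
--     return best
--
--
-- def getMaxCollectableCoins(R: int, C: int, G: List[List[str]]) -> int:
--     res = 0
--     for r in range(R - 1, -1, -1):
--         row = G[r]
--         stars = row.count('*')
--         if all(x == '>' for x in row):
--             res = 0
--         elif '>' in row and 'v' in row:
--             res += _best_cycle(row)
--         elif '>' in row:
--             res = max(stars, (0 if stars == 0 else 1) + res)
--         else:
--             res += 0 if stars == 0 else 1
--     return res
-- ===== Notes on version B (the rewrite author's own statement) =====
-- stated objective: alternative
-- what changed: Per row, A scans the row doubled (G[row]*2) with a takeable/reset state machine and recomputes statistics with a four-flag loop; B rotates the circular row to end at its first 'v', splits it into complete 'v'-terminated arcs, takes the max over arcs of '*' counted after the arc's first '>', and gets the row statistics from count/membership primitives.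
import Mathlib
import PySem

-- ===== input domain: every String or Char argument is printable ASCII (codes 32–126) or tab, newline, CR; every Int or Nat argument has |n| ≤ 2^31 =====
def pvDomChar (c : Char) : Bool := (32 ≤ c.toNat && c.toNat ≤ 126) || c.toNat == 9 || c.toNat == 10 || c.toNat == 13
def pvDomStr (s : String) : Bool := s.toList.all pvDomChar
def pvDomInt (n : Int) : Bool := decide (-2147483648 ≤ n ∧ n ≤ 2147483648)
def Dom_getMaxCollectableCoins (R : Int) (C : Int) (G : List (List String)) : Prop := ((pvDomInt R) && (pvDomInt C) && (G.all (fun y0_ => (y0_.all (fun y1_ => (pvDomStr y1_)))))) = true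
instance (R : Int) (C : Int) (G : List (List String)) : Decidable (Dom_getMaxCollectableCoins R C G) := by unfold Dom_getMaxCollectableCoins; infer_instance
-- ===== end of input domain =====

-- B replaces A's doubled-row linear scan per row by a rotate-to-first-'v' +
-- split-into-arcs computation (max over 'v'-terminated arcs of coins after the
-- first '>'), and computes the row statistics with count/membership instead of
-- flag loops; objective: alternative decomposition, same asymptotic cost.


-- ===== PORT A =====

-- A's get_row_stats loop body, state (contains_right, contains_down, contains_coin, is_passable)
def pvStatsStep : (Bool × Bool × Bool × Bool) → String → (Bool × Bool × Bool × Bool)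
  | (cr, cd, cc, ip), x =>
    let ip := if x ≠ ">" then true else ip
    if x = ">" then (true, cd, cc, ip)
    else if x = "v" then (cr, true, cc, ip)
    else if x = "*" then (cr, cd, true, ip)
    else (cr, cd, cc, ip)

def pvRowStats (row : List String) : Bool × Bool × Bool × Bool :=
  row.foldl pvStatsStep (false, false, false, false)

-- A's get_max_coins loop body, state (max_coins, cur_coins, takeable)
def pvMCStep : (Int × Int × Bool) → String → (Int × Int × Bool)
  | (m, c, t), x =>
    let t := if x = ">" then true else t
    if t then
      if x = "v" then (max m c, 0, false)
      else if x = "*" then (m, c + 1, t)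
      else (m, c, t)
    else (m, c, t)

-- A's get_max_coins: scan G[row] * 2
def pvMaxCoins (row : List String) : Int :=
  ((row ++ row).foldl pvMCStep (0, 0, false)).1

def getMaxCollectableCoins (R : Int) (C : Int) (G : List (List String)) : Int :=
  (PySem.List.pyRange (R - 1) (-1) (-1)).foldl (fun res r =>
    let row := (PySem.List.pyGet? G r).getD []
    let s := pvRowStats row
    if !s.2.2.2 then 0
    else if s.1 && s.2.1 then res + pvMaxCoins row
    else if s.1 then
      max ((row.map (fun x => if x = "*" then (1 : Int) else 0)).sum)
          ((if s.2.2.1 then 1 else 0) + res)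
    else if s.2.2.2 then res + (if s.2.2.1 then 1 else 0)
    else res) 0

-- ===== PORT B =====

-- coins in one arc: '*' cells after the first '>'
def pvCoinsAfterArrow (seg : List String) : Int :=
  match PySem.List.index? seg ">" with
  | none => 0
  | some i => ((PySem.List.slice seg (some ((i : Int) + 1)) none).count "*" : Int)

-- the split-on-'v' loop body, state (best, current segment)
def pvBestStep : (Int × List String) → String → (Int × List String)
  | (best, seg), x =>
    if x = "v" then (max best (pvCoinsAfterArrow seg), []) else (best, seg ++ [x])

def pvBestCycle (row : List String) : Int :=
  let k := (PySem.List.index? row "v").getD 0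
  let cyc := PySem.List.slice row (some ((k : Int) + 1)) none ++
             PySem.List.slice row none (some ((k : Int) + 1))
  (cyc.foldl pvBestStep (0, [])).1

def getMaxCollectableCoins_alt (R : Int) (C : Int) (G : List (List String)) : Int :=
  (PySem.List.pyRange (R - 1) (-1) (-1)).foldl (fun res r =>
    let row := (PySem.List.pyGet? G r).getD []
    let stars : Int := (row.count "*" : Int)
    if row.all (fun x => x == ">") then 0
    else if row.contains ">" && row.contains "v" then res + pvBestCycle row
    else if row.contains ">" then max stars ((if stars == 0 then 0 else 1) + res)
    else res + (if stars == 0 then 0 else 1)) 0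

-- ===== PRECONDITION & SPEC =====
-- A indexes G[r] for r = R-1 … 0, so it raises IndexError iff R > len(G).
def Pre_getMaxCollectableCoins (R : Int) (C : Int) (G : List (List String)) : Prop :=
  R ≤ (G.length : Int)
instance (R : Int) (C : Int) (G : List (List String)) : Decidable (Pre_getMaxCollectableCoins R C G) := by unfold Pre_getMaxCollectableCoins; infer_instance

def pvWitness_getMaxCollectableCoins : Int × Int × List (List String) :=
  (3, 3, [[">", "*", "v"], [".", "*", "."], [">", "*", ">"]])

def Spec_getMaxCollectableCoins (R : Int) (C : Int) (G : List (List String)) (out : Int) : Prop := out = getMaxCollectableCoins_alt R C G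
instance (R : Int) (C : Int) (G : List (List String)) (out : Int) : Decidable (Spec_getMaxCollectableCoins R C G out) := by unfold Spec_getMaxCollectableCoins; infer_instance

-- ===== CLAIM (what is proved, stated in full; the proofs are below) =====
def Claim_equal_getMaxCollectableCoins : Prop := ∀ (R : Int) (C : Int) (G : List (List String)), Dom_getMaxCollectableCoins R C G → Pre_getMaxCollectableCoins R C G → Spec_getMaxCollectableCoins R C G (getMaxCollectableCoins R C G)

-- ===== LEMMAS AND PROOFS =====

-- abbreviation used throughout: run A's coin scan
def pvRun (s : Int × Int × Bool) (xs : List String) : Int × Int × Bool :=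
  xs.foldl pvMCStep s

-- coins after the first '>' (structural version of pvCoinsAfterArrow)
def pvH (seg : List String) : Int :=
  match seg with
  | [] => 0
  | x :: xs => if x = ">" then (xs.count "*" : Int) else pvH xs

theorem pvRun_nil (s : Int × Int × Bool) : pvRun s [] = s := rfl

theorem pvRun_cons (s : Int × Int × Bool) (x : String) (xs : List String) :
    pvRun s (x :: xs) = pvRun (pvMCStep s x) xs := rfl

theorem pvRun_append (s : Int × Int × Bool) (xs ys : List String) :
    pvRun s (xs ++ ys) = pvRun (pvRun s xs) ys := List.foldl_append

theorem pvMCStep_arrow (m c : Int) (t : Bool) : pvMCStep (m, c, t) ">" = (m, c, true) := by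
  simp [pvMCStep]

theorem pvMCStep_down_t (m c : Int) : pvMCStep (m, c, true) "v" = (max m c, 0, false) := by
  simp [pvMCStep]

theorem pvMCStep_down_f (m c : Int) : pvMCStep (m, c, false) "v" = (m, c, false) := by
  simp [pvMCStep]

theorem pvMCStep_coin_t (m c : Int) : pvMCStep (m, c, true) "*" = (m, c + 1, true) := by
  simp [pvMCStep]

theorem pvMCStep_coin_f (m c : Int) : pvMCStep (m, c, false) "*" = (m, c, false) := by
  simp [pvMCStep]

theorem pvMCStep_other (m c : Int) (t : Bool) (x : String)
    (h1 : x ≠ ">") (h2 : x ≠ "v") (h3 : x ≠ "*") : pvMCStep (m, c, t) x = (m, c, t) := by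
  cases t <;> simp [pvMCStep, h1, h2, h3]

theorem pvH_of_no_arrow (seg : List String) (h : ">" ∉ seg) : pvH seg = 0 := by
  induction seg with
  | nil => rfl
  | cons x xs ih =>
    simp only [List.mem_cons, not_or] at h
    simp [pvH, Ne.symm h.1, ih h.2]

theorem pvH_nonneg (seg : List String) : 0 ≤ pvH seg := by
  induction seg with
  | nil => simp [pvH]
  | cons x xs ih => by_cases h : x = ">" <;> simp [pvH, h, ih]

theorem pvH_le_count (seg : List String) : pvH seg ≤ (seg.count "*" : Int) := by
  induction seg with
  | nil => simp [pvH]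
  | cons x xs ih =>
    have key : xs.count "*" ≤ (x :: xs).count "*" := by
      rw [List.count_cons]; split <;> omega
    by_cases h : x = ">"
    · subst h
      simp only [pvH]
      rw [if_pos trivial]
      exact_mod_cast key
    · simp only [pvH, if_neg h]
      exact le_trans ih (by exact_mod_cast key)

theorem pvCAA_none (seg : List String) (h : PySem.List.index? seg ">" = none) :
    pvCoinsAfterArrow seg = 0 := by
  unfold pvCoinsAfterArrow
  rw [h]

theorem pvCAA_some (seg : List String) (i : Nat) (h : PySem.List.index? seg ">" = some i) :
    pvCoinsAfterArrow seg
      = ((PySem.List.slice seg (some ((i : Int) + 1)) none).count "*" : Int) := by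
  unfold pvCoinsAfterArrow
  rw [h]

theorem pvH_eq_coinsAfterArrow (seg : List String) : pvCoinsAfterArrow seg = pvH seg := by
  induction seg with
  | nil =>
    rw [pvCAA_none _ ((PySem.List.index?_eq_none_iff _ _).mpr (by simp))]
    rfl
  | cons x xs ih =>
    by_cases h : x = ">"
    · subst h
      rw [pvCAA_some _ 0 (PySem.List.index?_cons_self _ _),
        show (((0 : Nat) : Int)) + 1 = (((1 : Nat)) : Int) by norm_num,
        PySem.List.slice_from_natCast]
      simp [pvH]
    · cases hidx : PySem.List.index? xs ">" with
      | none =>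
        have hcons : PySem.List.index? (x :: xs) ">" = none := by
          rw [PySem.List.index?_cons_of_ne xs h, hidx]
          rfl
        have hnm : ">" ∉ xs := (PySem.List.index?_eq_none_iff _ _).mp hidx
        rw [pvCAA_none _ hcons]
        simp [pvH, h, pvH_of_no_arrow xs hnm]
      | some i =>
        have hcons : PySem.List.index? (x :: xs) ">" = some (i + 1) := by
          rw [PySem.List.index?_cons_of_ne xs h, hidx]
          rfl
        have hx : pvCoinsAfterArrow (x :: xs) = (((x :: xs).drop (i + 2)).count "*" : Int) := by
          rw [pvCAA_some _ (i + 1) hcons,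
            show (((i + 1 : Nat) : Int)) + 1 = (((i + 2 : Nat)) : Int) by push_cast; ring,
            PySem.List.slice_from_natCast]
        have hx2 : pvCoinsAfterArrow xs = ((xs.drop (i + 1)).count "*" : Int) := by
          rw [pvCAA_some _ i hidx,
            show (((i : Nat) : Int)) + 1 = (((i + 1 : Nat)) : Int) by push_cast; ring,
            PySem.List.slice_from_natCast]
        rw [hx, show i + 2 = (i + 1) + 1 from rfl, List.drop_succ_cons,
          show pvH (x :: xs) = pvH xs by simp [pvH, h], ← ih, hx2]

-- running A's scan over a 'v'-free list
theorem pvRun_noV (seg : List String) (h : "v" ∉ seg) (m c : Int) (t : Bool) :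
    pvRun (m, c, t) seg =
      (m, c + (if t then (seg.count "*" : Int) else pvH seg), t || seg.contains ">") := by
  induction seg generalizing c t with
  | nil => cases t <;> simp [pvRun_nil, pvH]
  | cons x xs ih =>
    have hxv : x ≠ "v" := by rintro rfl; exact h List.mem_cons_self
    have hxs : "v" ∉ xs := fun hmem => h (List.mem_cons_of_mem _ hmem)
    rw [pvRun_cons]
    by_cases h1 : x = ">"
    · subst h1
      rw [pvMCStep_arrow, ih hxs]
      cases t <;> simp [pvH, List.count_cons, List.contains_cons]
    · by_cases h3 : x = "*"
      · subst h3
        cases t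
        · rw [pvMCStep_coin_f, ih hxs]
          simp [pvH, List.contains_cons]
        · rw [pvMCStep_coin_t, ih hxs]
          have hcount : ((("*" :: xs).count "*" : Nat) : Int) = (xs.count "*" : Int) + 1 := by
            rw [List.count_cons]
            simp
          have hcont : ("*" :: xs).contains ">" = xs.contains ">" := by
            rw [List.contains_cons]
            simp
          rw [hcount, hcont]
          simp only [eq_self_iff_true, if_true, Prod.mk.injEq, true_and, and_true]
          ring
      · rw [pvMCStep_other m c t x h1 hxv h3, ih hxs]
        have f1 : (x == ("*" : String)) = false := beq_eq_false_iff_ne.mpr h3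
        have f2 : ((">" : String) == x) = false := beq_eq_false_iff_ne.mpr (fun e => h1 e.symm)
        have hpvH : pvH (x :: xs) = pvH xs := by simp [pvH, h1]
        have hcount : (x :: xs).count "*" = xs.count "*" := by
          rw [List.count_cons, f1]
          simp
        have hcont : (x :: xs).contains ">" = xs.contains ">" := by
          rw [List.contains_cons, f2]
          simp
        rw [hpvH, hcount, hcont]

-- a 'v'-terminated segment from a clean state records max m (pvH seg)
theorem pvRun_seg (seg : List String) (h : "v" ∉ seg) (m : Int) (hm : 0 ≤ m) :
    pvRun (m, 0, false) (seg ++ ["v"]) = (max m (pvH seg), 0, false) := by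
  rw [pvRun_append, pvRun_noV seg h]
  simp only [Bool.false_or, Bool.false_eq_true, if_false, zero_add]
  cases hr : seg.contains ">"
  · have h0 : pvH seg = 0 := pvH_of_no_arrow seg (by simpa using hr)
    rw [h0, pvRun_cons, pvMCStep_down_f, pvRun_nil, max_eq_left hm]
  · rw [pvRun_cons, pvMCStep_down_t, pvRun_nil]

theorem pvMCStep_nonneg (m c : Int) (t : Bool) (x : String) (hm : 0 ≤ m) (hc : 0 ≤ c) :
    0 ≤ (pvMCStep (m, c, t) x).1 ∧ 0 ≤ (pvMCStep (m, c, t) x).2.1 := by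
  cases t <;> simp only [pvMCStep] <;> split_ifs <;> simp <;> omega

theorem pvMCStep_inv (m c : Int) (t : Bool) (x : String) (h : t = false → c = 0) :
    (pvMCStep (m, c, t) x).2.2 = false → (pvMCStep (m, c, t) x).2.1 = 0 := by
  cases t <;> simp only [pvMCStep] <;> split_ifs <;> simp_all

-- nonnegativity invariant
theorem pvRun_nonneg (xs : List String) :
    ∀ s : Int × Int × Bool, 0 ≤ s.1 → 0 ≤ s.2.1 →
      0 ≤ (pvRun s xs).1 ∧ 0 ≤ (pvRun s xs).2.1 := by
  induction xs with
  | nil => intro s h1 h2; exact ⟨h1, h2⟩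
  | cons x xs ih =>
    rintro ⟨m, c, t⟩ h1 h2
    rw [pvRun_cons]
    exact ih _ (pvMCStep_nonneg m c t x h1 h2).1 (pvMCStep_nonneg m c t x h1 h2).2

-- t = false → c = 0 invariant
theorem pvRun_inv (xs : List String) :
    ∀ s : Int × Int × Bool, (s.2.2 = false → s.2.1 = 0) →
      ((pvRun s xs).2.2 = false → (pvRun s xs).2.1 = 0) := by
  induction xs with
  | nil => intro s h; exact h
  | cons x xs ih =>
    rintro ⟨m, c, t⟩ h
    rw [pvRun_cons]
    exact ih _ (pvMCStep_inv m c t x h)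

theorem pvMCStep_max_sep (m c : Int) (t : Bool) (x : String) (hm : 0 ≤ m) (hc : 0 ≤ c) :
    pvMCStep (m, c, t) x = (max m (pvMCStep (0, c, t) x).1, (pvMCStep (0, c, t) x).2) := by
  cases t <;> simp only [pvMCStep] <;> split_ifs <;> simp <;> omega

-- the max accumulator separates
theorem pvRun_max_sep (xs : List String) :
    ∀ (m c : Int) (t : Bool), 0 ≤ m → 0 ≤ c →
      pvRun (m, c, t) xs = (max m (pvRun (0, c, t) xs).1, (pvRun (0, c, t) xs).2) := by
  induction xs with
  | nil => intro m c t hm hc; simp [pvRun_nil, max_eq_left hm]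
  | cons x xs ih =>
    intro m c t hm hc
    rw [pvRun_cons, pvRun_cons, pvMCStep_max_sep m c t x hm hc]
    obtain ⟨h1, h2⟩ := pvMCStep_nonneg 0 c t x le_rfl hc
    generalize hA : pvMCStep (0, c, t) x = a at h1 h2 ⊢
    obtain ⟨m0, c0, t0⟩ := a
    simp only at h1 h2
    show pvRun (max m m0, c0, t0) xs = (max m (pvRun (m0, c0, t0) xs).1, (pvRun (m0, c0, t0) xs).2)
    rw [ih (max m m0) c0 t0 (le_trans h1 (le_max_right m m0)) h2, ih m0 c0 t0 h1 h2]
    simp [max_assoc]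

-- B's split loop computes A's scan (discarding the pending segment)
theorem pvBest_sim (ys : List String) :
    ∀ (m : Int) (seg : List String), "v" ∉ seg → 0 ≤ m →
      (ys.foldl pvBestStep (m, seg)).1 = (pvRun (pvRun (m, 0, false) seg) ys).1 := by
  induction ys with
  | nil =>
    intro m seg hseg hm
    rw [pvRun_noV seg hseg]
    rfl
  | cons x ys ih =>
    intro m seg hseg hm
    simp only [List.foldl_cons]
    by_cases hx : x = "v"
    · subst hx
      have hstep : pvBestStep (m, seg) "v" = (max m (pvH seg), []) := by
        simp [pvBestStep, pvH_eq_coinsAfterArrow]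
      rw [hstep, ih (max m (pvH seg)) [] (by simp) (le_trans hm (le_max_left _ _)),
        pvRun_nil,
        show pvRun (pvRun (m, 0, false) seg) ("v" :: ys)
          = pvRun (pvMCStep (pvRun (m, 0, false) seg) "v") ys from rfl,
        show pvMCStep (pvRun (m, 0, false) seg) "v" = pvRun (m, 0, false) (seg ++ ["v"]) by
          rw [pvRun_append]; rfl,
        pvRun_seg seg hseg m hm]
    · have hstep : pvBestStep (m, seg) x = (m, seg ++ [x]) := by
        simp [pvBestStep, hx]
      have hmem : "v" ∉ seg ++ [x] := by
        simp only [List.mem_append, List.mem_singleton]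
        rintro (hv | hv)
        · exact hseg hv
        · exact hx hv.symm
      rw [hstep, ih m (seg ++ [x]) hmem hm, pvRun_append]
      rfl

-- the central per-row lemma: A's doubled scan = B's rotate-and-split computation
theorem pvMaxCoins_eq_bestCycle (row : List String) (h : "v" ∈ row) :
    pvMaxCoins row = pvBestCycle row := by
  -- first-occurrence decomposition row = p ++ "v" :: q with "v" ∉ p
  have hsome : (PySem.List.index? row "v").isSome = true :=
    (PySem.List.index?_isSome_iff _ _).mpr h
  obtain ⟨k, hk⟩ := Option.isSome_iff_exists.mp hsome
  obtain ⟨p, q, hrow, hlen, hnp⟩ := (PySem.List.index?_eq_some_iff _ _ _).mp hk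
  have hgd : ((PySem.List.index? row "v").getD 0 : Int) = (p.length : Int) := by
    rw [hk, hlen]; rfl
  have hpf : PySem.List.slice row (some ((p.length : Int) + 1)) none = q := by
    rw [show ((p.length : Int) + 1) = (((p.length + 1 : Nat)) : Int) by push_cast; ring,
      PySem.List.slice_from_natCast, hrow,
      show p ++ "v" :: q = (p ++ ["v"]) ++ q by simp,
      List.drop_left' (by simp)]
  have hpt : PySem.List.slice row none (some ((p.length : Int) + 1)) = p ++ ["v"] := by
    rw [show ((p.length : Int) + 1) = (((p.length + 1 : Nat)) : Int) by push_cast; ring,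
      PySem.List.slice_to_natCast, hrow,
      show p ++ "v" :: q = (p ++ ["v"]) ++ q by simp,
      List.take_left' (by simp)]
  -- B's value is the scan of the rotation q ++ p ++ ["v"]
  have hB : pvBestCycle row = (pvRun (0, 0, false) (q ++ (p ++ ["v"]))).1 := by
    show ((PySem.List.slice row (some ((((PySem.List.index? row "v").getD 0 : Nat) : Int) + 1)) none ++
        PySem.List.slice row none (some ((((PySem.List.index? row "v").getD 0 : Nat) : Int) + 1))).foldl
        pvBestStep (0, [])).1 = _
    rw [hgd, hpf, hpt, pvBest_sim _ 0 [] (by simp) le_rfl]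
    rfl
  -- A's value: split the doubled row as (p ++ ["v"]) ++ (q ++ (p ++ ["v"])) ++ q
  have hA : pvMaxCoins row
      = (pvRun (pvRun (pvH p, 0, false) (q ++ (p ++ ["v"]))) q).1 := by
    unfold pvMaxCoins
    rw [hrow, show (p ++ "v" :: q) ++ (p ++ "v" :: q)
        = (p ++ ["v"]) ++ ((q ++ (p ++ ["v"])) ++ q) by simp]
    show (pvRun (0, 0, false) ((p ++ ["v"]) ++ ((q ++ (p ++ ["v"])) ++ q))).1 = _
    rw [pvRun_append, pvRun_seg p hnp 0 le_rfl, max_eq_right (pvH_nonneg p), pvRun_append]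
  -- analyse the state after q
  rcases hqs : pvRun (0, 0, false) q with ⟨rq, c1, t1⟩
  have hnn := pvRun_nonneg q (0, 0, false) le_rfl le_rfl
  rw [hqs] at hnn
  have hrq : 0 ≤ rq := hnn.1
  have hc1 : 0 ≤ c1 := hnn.2
  have hinv : t1 = false → c1 = 0 := by
    have h0 := pvRun_inv q (0, 0, false) (by intro _; rfl)
    rw [hqs] at h0
    exact h0
  -- the clean state reached at the final 'v' of the rotation
  have key : ∃ B0 : Int, pvRun (0, 0, false) (q ++ (p ++ ["v"])) = (B0, 0, false) ∧
      pvH p ≤ B0 ∧ rq ≤ B0 ∧ 0 ≤ B0 := by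
    rw [pvRun_append, hqs]
    cases t1 with
    | false =>
      have hc0 : c1 = 0 := hinv rfl
      subst hc0
      rw [pvRun_seg p hnp rq hrq]
      exact ⟨max rq (pvH p), rfl, le_max_right _ _, le_max_left _ _,
        le_trans hrq (le_max_left _ _)⟩
    | true =>
      rw [show p ++ ["v"] = p ++ ["v"] from rfl, pvRun_append, pvRun_noV p hnp]
      simp only [if_pos rfl, Bool.true_or]
      rw [pvRun_cons, pvMCStep_down_t, pvRun_nil]
      refine ⟨max rq (c1 + (p.count "*" : Int)), rfl, ?_, le_max_left _ _,
        le_trans hrq (le_max_left _ _)⟩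
      have h1 : pvH p ≤ (p.count "*" : Int) := pvH_le_count p
      have h2 : (p.count "*" : Int) ≤ c1 + (p.count "*" : Int) := by omega
      exact le_trans (le_trans h1 h2) (le_max_right _ _)
  obtain ⟨B0, hB0, hple, hrqle, hB0nn⟩ := key
  -- conclude
  rw [hA, pvRun_max_sep _ (pvH p) 0 false (pvH_nonneg p) le_rfl, hB0]
  simp only [max_eq_right hple]
  rw [hB, hB0]
  have : (pvRun (B0, 0, false) q).1 = max B0 rq := by
    rw [pvRun_max_sep q B0 0 false hB0nn le_rfl, hqs]
  rw [this, max_eq_left hrqle]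

-- row statistics: A's flag loop computes contains / any
theorem pvStats_gen (row : List String) (a b c d : Bool) :
    row.foldl pvStatsStep (a, b, c, d) =
      (a || row.contains ">", b || row.contains "v", c || row.contains "*",
       d || row.any (fun x => !(x == ">"))) := by
  induction row generalizing a b c d with
  | nil => simp
  | cons x xs ih =>
    simp only [List.foldl_cons, List.contains_cons, List.any_cons]
    by_cases h1 : x = ">"
    · subst h1
      rw [show pvStatsStep (a, b, c, d) ">" = (true, b, c, d) by simp [pvStatsStep], ih]
      simp
    · have f2 : ((">" : String) == x) = false := beq_eq_false_iff_ne.mpr (fun e => h1 e.symm)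
      by_cases h2 : x = "v"
      · subst h2
        rw [show pvStatsStep (a, b, c, d) "v" = (a, true, c, true) by simp [pvStatsStep], ih]
        simp [f2]
      · have f3 : (("v" : String) == x) = false := beq_eq_false_iff_ne.mpr (fun e => h2 e.symm)
        by_cases h3 : x = "*"
        · subst h3
          rw [show pvStatsStep (a, b, c, d) "*" = (a, b, true, true) by simp [pvStatsStep], ih]
          simp [f2, f3]
        · have f4 : (("*" : String) == x) = false := beq_eq_false_iff_ne.mpr (fun e => h3 e.symm)
          have f5 : (x == ">") = false := beq_eq_false_iff_ne.mpr h1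
          rw [show pvStatsStep (a, b, c, d) x = (a, b, c, true) by
            simp [pvStatsStep, h1, h2, h3], ih]
          simp [f2, f3, f4, f5]

theorem pvRowStats_eq (row : List String) :
    pvRowStats row =
      (row.contains ">", row.contains "v", row.contains "*",
       row.any (fun x => !(x == ">"))) := by
  unfold pvRowStats
  rw [pvStats_gen]
  simp

theorem pvSum_eq_count (row : List String) :
    (row.map (fun x => if x = "*" then (1 : Int) else 0)).sum = (row.count "*" : Int) := by
  induction row with
  | nil => simp
  | cons x xs ih =>
    by_cases h : x = "*"
    · subst h
      simp [ih, List.count_cons]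
      push_cast
      ring
    · have f1 : (("*" : String) == x) = false := beq_eq_false_iff_ne.mpr (fun e => h e.symm)
      simp [h, ih, List.count_cons, f1]

theorem pvAll_eq_not_any (row : List String) :
    row.all (fun x => x == ">") = !row.any (fun x => !(x == ">")) := by
  induction row with
  | nil => rfl
  | cons x xs ih => simp [ih]

theorem pvStep_eq (res : Int) (row : List String) :
    (let s := pvRowStats row
     if !s.2.2.2 then 0
     else if s.1 && s.2.1 then res + pvMaxCoins row
     else if s.1 then
       max ((row.map (fun x => if x = "*" then (1 : Int) else 0)).sum)
           ((if s.2.2.1 then 1 else 0) + res)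
     else if s.2.2.2 then res + (if s.2.2.1 then 1 else 0)
     else res) =
    (let stars : Int := (row.count "*" : Int)
     if row.all (fun x => x == ">") then 0
     else if row.contains ">" && row.contains "v" then res + pvBestCycle row
     else if row.contains ">" then max stars ((if stars == 0 then 0 else 1) + res)
     else res + (if stars == 0 then 0 else 1)) := by
  simp only [pvRowStats_eq, pvAll_eq_not_any, pvSum_eq_count]
  have hcoin : (if "*" ∈ row then (1 : Int) else 0)
      = (if List.count "*" row = 0 then 0 else 1) := by
    by_cases hc : "*" ∈ row
    · have : List.count "*" row ≠ 0 := by simpa [List.count_eq_zero] using hc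
      simp [hc, this]
    · have : List.count "*" row = 0 := List.count_eq_zero.mpr hc
      simp [hc, this]
  cases hp : row.any (fun x => !(x == ">"))
  · simp [hp]
  · simp only [hp, Bool.not_true, Bool.false_eq_true, if_false, if_true]
    cases hr : row.contains ">"
    · simp [hcoin]
    · cases hd : row.contains "v"
      · simp [hcoin]
      · simp [pvMaxCoins_eq_bestCycle row (by simpa using hd)]

-- ===== VERDICT (by name: the statement is the Claim_ definition above) =====
theorem getMaxCollectableCoins_spec : Claim_equal_getMaxCollectableCoins := by
  intro R C G _ _
  unfold Spec_getMaxCollectableCoins getMaxCollectableCoins getMaxCollectableCoins_alt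
  apply PySem.List.foldl_congr_mem
  intro res r _
  exact pvStep_eq res ((PySem.List.pyGet? G r).getD [])
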